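-- pv_equiv track=rewrite | github.com/HumphreyHCB/BuboExperiments | LoopProfiling/CFG_Verification/dot_cfg_to_loops_csv.py | extract_label_value
-- ===== SOURCE A (Python) =====
-- def extract_label_value(node_chunk: str) -> str:
--     """
--     Extract label="...".
--     Keeps backslash escapes like \n as-is (we don't need to unescape for our regexes).
--     """
--     key = 'label="'
--     start = node_chunk.find(key)
--     if start < 0:
--         return ""
--     p = start + len(key)
--
--     out = []
--     escaped = False
--     while p < len(node_chunk):
--         ch = node_chunk[p]
--         if escaped:
--             out.append(ch)
--             escaped = False
--         else:
--             if ch == '\\':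
--                 escaped = True
--                 out.append(ch)
--             elif ch == '"':
--                 break
--             else:
--                 out.append(ch)
--         p += 1
--     return "".join(out)
-- ===== SOURCE B (Python) =====
-- def extract_label_value(node_chunk: str) -> str:
--     """Extract label="..." by jumping between quote candidates with str.find
--     and checking backslash-run parity, instead of a char-by-char escape flag."""
--     key = 'label="'
--     start = node_chunk.find(key)
--     if start < 0:
--         return ""
--     tail = node_chunk[start + len(key):]
--     i = 0
--     while True:
--         q = tail.find('"', i)
--         if q == -1:
--             return tail
--         r = q
--         while r > 0 and tail[r - 1] == '\\':
--             r -= 1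
--         if (q - r) % 2 == 0:
--             return tail[:q]
--         i = q + 1
-- ===== Notes on version B (the rewrite author's own statement) =====
-- stated objective: alternative
-- what changed: Replaces A's char-by-char scan with an escaped boolean flag by repeated str.find jumps between double-quote candidates, deciding each candidate by the parity of the run of backslashes immediately before it and returning a slice of the tail.
import Mathlib
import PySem

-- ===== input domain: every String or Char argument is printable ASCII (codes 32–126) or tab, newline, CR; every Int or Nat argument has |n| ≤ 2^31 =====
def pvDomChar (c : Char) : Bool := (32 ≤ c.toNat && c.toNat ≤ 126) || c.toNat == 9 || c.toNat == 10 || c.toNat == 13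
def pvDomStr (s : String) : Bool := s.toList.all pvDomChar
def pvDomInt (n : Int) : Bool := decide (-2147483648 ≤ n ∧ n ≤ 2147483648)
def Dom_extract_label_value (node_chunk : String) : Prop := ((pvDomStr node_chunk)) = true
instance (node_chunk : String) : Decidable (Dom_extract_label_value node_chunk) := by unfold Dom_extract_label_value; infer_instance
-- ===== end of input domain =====

-- B replaces A's char-by-char escaped-flag scan by find()-jumps between quote
-- candidates with a backslash-run parity check (objective: alternative decomposition).


-- ===== PORT A =====
-- the while loop of A: index p walks the remaining characters, with the escaped flag
def pvScanA : List Char → Bool → List Char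
  | [], _ => []
  | c :: rest, escaped =>
    if escaped then c :: pvScanA rest false
    else if c = '\\' then c :: pvScanA rest true
    else if c = '"' then []
    else c :: pvScanA rest false

def extract_label_value (node_chunk : String) : String :=
  let start := PySem.Str.find node_chunk "label=\""
  if start < 0 then ""
  else String.ofList (pvScanA (node_chunk.toList.drop (start + 7).toNat) false)

-- ===== PORT B =====
-- B's inner while: r walks down while tail[r-1] == '\\' (pvBsFinal returns the final r)
def pvBsFinal (t : List Char) : Nat → Nat
  | 0 => 0
  | r + 1 => if t.getD r ' ' = '\\' then pvBsFinal t r else r + 1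

-- termination facts for B's outer loop (cited by decreasing_by below)
lemma pvFindFrom_bounds (t : List Char) (i : Nat)
    (h : PySem.Chars.findFrom t ['"'] (i : Int) ≠ -1) :
    i ≤ (PySem.Chars.findFrom t ['"'] (i : Int)).toNat ∧
      (PySem.Chars.findFrom t ['"'] (i : Int)).toNat < t.length := by
  by_cases hi : i ≤ t.length
  · obtain ⟨h1, h2, _⟩ := PySem.Chars.findFrom_natCast_spec t ['"'] i hi h
    have hne : List.drop (PySem.Chars.findFrom t ['"'] (i : Int)).toNat t ≠ [] := by
      intro he; rw [he] at h2; simp at h2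
    rw [List.ne_nil_iff_length_pos, List.length_drop] at hne
    exact ⟨by omega, by omega⟩
  · exfalso; apply h
    simp only [PySem.Chars.findFrom]
    rw [if_pos (by omega)]

-- B's outer while: jump between '"' candidates with find
def pvAltLoop (t : List Char) (i : Nat) : List Char :=
  let q := PySem.Chars.findFrom t ['"'] (i : Int)
  if hq : q = -1 then t
  else
    let r := pvBsFinal t q.toNat
    if (q.toNat - r) % 2 = 0 then t.take q.toNat
    else pvAltLoop t (q.toNat + 1)
termination_by t.length + 1 - i
decreasing_by
  have := pvFindFrom_bounds t i hq
  omega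

def extract_label_value_alt (node_chunk : String) : String :=
  let start := PySem.Str.find node_chunk "label=\""
  if start < 0 then ""
  else
    let tail := PySem.List.slice node_chunk.toList (some (start + 7)) none
    String.ofList (pvAltLoop tail 0)

-- ===== PRECONDITION & SPEC =====
def Spec_extract_label_value (node_chunk : String) (out : String) : Prop := out = extract_label_value_alt node_chunk
instance (node_chunk : String) (out : String) : Decidable (Spec_extract_label_value node_chunk out) := by unfold Spec_extract_label_value; infer_instance

-- ===== CLAIM (what is proved, stated in full; the proofs are below) =====
def Claim_equal_extract_label_value : Prop := ∀ (node_chunk : String), Dom_extract_label_value node_chunk → Spec_extract_label_value node_chunk (extract_label_value node_chunk)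

-- ===== LEMMAS AND PROOFS =====

-- the number of trailing backslashes of a list
def pvTrail (a : List Char) : Nat := (a.reverse.takeWhile (fun c => c = '\\')).length

lemma pvTrail_concat (a : List Char) (c : Char) :
    pvTrail (a ++ [c]) = if c = '\\' then pvTrail a + 1 else 0 := by
  simp [pvTrail, List.takeWhile]
  split_ifs with h <;> simp [h]

lemma pvTrail_append (u a : List Char) (h : pvTrail u = 0) :
    pvTrail (u ++ a) = pvTrail a := by
  induction a using List.reverseRecOn with
  | nil => simpa using h
  | append_singleton a c ih =>
      rw [← List.append_assoc, pvTrail_concat, pvTrail_concat, ih]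

lemma pvBsFinal_le (t : List Char) (q : Nat) : pvBsFinal t q ≤ q := by
  induction q with
  | zero => simp [pvBsFinal]
  | succ r ih => rw [pvBsFinal]; split_ifs <;> omega

lemma pvBsFinal_trail (t : List Char) (q : Nat) (hq : q ≤ t.length) :
    q - pvBsFinal t q = pvTrail (t.take q) := by
  induction q with
  | zero => simp [pvBsFinal, pvTrail]
  | succ r ih =>
      have hr : r < t.length := by omega
      have htake : t.take (r + 1) = t.take r ++ [t[r]] := by
        rw [List.take_add_one]; simp [List.getElem?_eq_getElem hr]
      rw [pvBsFinal, htake, pvTrail_concat]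
      have hget : t.getD r ' ' = t[r] := by simp [List.getD, List.getElem?_eq_getElem hr]
      have hle := pvBsFinal_le t r
      split_ifs with h1 h2 h2
      · rw [← ih (by omega)]; omega
      · rw [hget] at h1; exact absurd h1 h2
      · rw [hget] at h1; exact absurd h2 h1
      · omega

-- escaped-flag evolution of A's scan
lemma pvScanA_noquote_append (a : List Char) :
    ∀ (y : List Char) (e : Bool), '"' ∉ a →
      pvScanA (a ++ y) e = a ++ pvScanA y (a.foldl (fun e c => !e && decide (c = '\\')) e) := by
  induction a with
  | nil => intro y e _; simp
  | cons c rest ih =>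
      intro y e h
      have hc : c ≠ '"' := by intro hc; exact h (by simp [hc])
      have hrest : '"' ∉ rest := fun hm => h (List.mem_cons_of_mem _ hm)
      cases e with
      | true => simp [pvScanA, ih y false hrest]
      | false =>
          by_cases hb : c = '\\'
          · simp [pvScanA, hb, ih y true hrest]
          · simp [pvScanA, hb, hc, ih y false hrest]

lemma pvFoldl_esc_parity (a : List Char) :
    a.foldl (fun e c => !e && decide (c = '\\')) false = decide (pvTrail a % 2 = 1) := by
  induction a using List.reverseRecOn with
  | nil => simp [pvTrail]
  | append_singleton a c ih =>
      rw [List.foldl_append, pvTrail_concat, ih]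
      by_cases hb : c = '\\'
      · by_cases h : pvTrail a % 2 = 1 <;>
          simp [hb, h, List.foldl] <;> omega
      · simp [hb, List.foldl]

lemma pvSingleton_prefix (c : Char) (l : List Char) : [c] <+: l ↔ l.head? = some c := by
  cases l with
  | nil => simp
  | cons x xs => simp [List.cons_prefix_iff]

-- main loop correspondence: B's jump loop from i equals "kept prefix ++ A's scan of the rest"
lemma pvMain (t : List Char) :
    ∀ (k i : Nat), t.length - i < k → i ≤ t.length →
      (i = 0 ∨ (0 < i ∧ t.getD (i - 1) ' ' = '"')) →
      pvAltLoop t i = t.take i ++ pvScanA (t.drop i) false := by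
  intro k
  induction k with
  | zero => intro i hk; omega
  | succ k ih =>
      intro i hk hi hb
      rw [pvAltLoop]
      set q : Int := PySem.Chars.findFrom t ['"'] (i : Int) with hqdef
      by_cases hq : q = -1
      · -- no quote from i: A's scan copies everything
        rw [dif_pos hq]
        have hnoq : '"' ∉ t.drop i := by
          have := (PySem.Chars.findFrom_natCast_eq_neg_one_iff t ['"'] i hi).mp hq
          intro hm
          obtain ⟨l1, l2, hsp⟩ := List.append_of_mem hm
          exact this ⟨l1, l2, by rw [hsp]; simp⟩
        have := pvScanA_noquote_append (t.drop i) [] false hnoq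
        simp only [List.append_nil, pvScanA] at this
        rw [this, List.take_append_drop]
      · rw [dif_neg hq]
        obtain ⟨hiq, hpre, hmin⟩ := PySem.Chars.findFrom_natCast_spec t ['"'] i hi hq
        rw [← hqdef] at hiq hpre hmin
        have hq0 : 0 ≤ q := le_trans (by positivity) hiq
        have hiqn : i ≤ q.toNat := by omega
        have hqlen : q.toNat < t.length := by
          have hne : t.drop q.toNat ≠ [] := by
            intro he; rw [he] at hpre; simp at hpre
          rw [List.ne_nil_iff_length_pos, List.length_drop] at hne; omega
        have hgq : t[q.toNat] = '"' := by
          have := (pvSingleton_prefix '"' _).mp hpre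
          rwa [List.head?_drop, List.getElem?_eq_getElem hqlen, Option.some_inj] at this
        -- decompose drop i = a ++ '"' :: drop (q+1), with no quote in a
        set a : List Char := (t.drop i).take (q.toNat - i) with hadef
        have hdropq : t.drop q.toNat = '"' :: t.drop (q.toNat + 1) := by
          rw [List.drop_eq_getElem_cons hqlen, hgq]
        have hsplit : t.drop i = a ++ '"' :: t.drop (q.toNat + 1) := by
          rw [hadef, ← hdropq]
          have hdd : t.drop q.toNat = (t.drop i).drop (q.toNat - i) := by
            rw [List.drop_drop]; congr 1; omega
          rw [hdd, List.take_append_drop]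
        have hnoqa : '"' ∉ a := by
          rw [hadef]
          intro hm
          obtain ⟨j, hj, hje⟩ := List.getElem_of_mem hm
          have hj' : j < q.toNat - i ∧ j < t.length - i := by
            simpa [List.length_take, List.length_drop] using hj
          have hij : i + j < t.length := by omega
          have hval : t[i + j] = '"' := by
            simpa [List.getElem_take, List.getElem_drop] using hje
          apply hmin (i + j) (by omega) (by omega)
          rw [pvSingleton_prefix, List.head?_drop, List.getElem?_eq_getElem hij, hval]
        -- trailing-backslash run of t.take q equals that of a
        have htr : q.toNat - pvBsFinal t q.toNat = pvTrail a := by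
          rw [pvBsFinal_trail t q.toNat (le_of_lt hqlen)]
          have htk : t.take q.toNat = t.take i ++ a := by
            rw [hadef, ← List.take_add]; congr 1; omega
          have htr0 : pvTrail (t.take i) = 0 := by
            rcases hb with hb | ⟨hipos, hb⟩
            · simp [hb, pvTrail]
            · have hi1 : i - 1 < t.length := by omega
              have : t.take i = t.take (i - 1) ++ [t[i - 1]] := by
                conv_lhs => rw [show i = (i - 1) + 1 by omega]
                rw [List.take_add_one]; simp [List.getElem?_eq_getElem hi1]
              rw [this, pvTrail_concat]
              have : t[i - 1] = '"' := by
                have := hb; rwa [List.getD, List.getElem?_eq_getElem hi1, Option.getD_some] at this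
              simp [this]
          rw [htk, pvTrail_append _ _ htr0]
        have hscan : pvScanA (t.drop i) false
            = a ++ pvScanA ('"' :: t.drop (q.toNat + 1)) (decide (pvTrail a % 2 = 1)) := by
          rw [hsplit, pvScanA_noquote_append a _ false hnoqa, pvFoldl_esc_parity]
        by_cases hpar : (q.toNat - pvBsFinal t q.toNat) % 2 = 0
        · rw [if_pos hpar]
          rw [htr] at hpar
          have hodd : pvTrail a % 2 ≠ 1 := by omega
          rw [hscan]
          simp only [hodd, decide_eq_true_eq, pvScanA]
          have htk : t.take q.toNat = t.take i ++ a := by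
            rw [hadef, ← List.take_add]; congr 1; omega
          simp [htk]
        · rw [if_neg hpar]
          rw [htr] at hpar
          have hodd : pvTrail a % 2 = 1 := by omega
          rw [hscan, hodd]
          simp only [decide_true, pvScanA]
          rw [ih (q.toNat + 1) (by omega) (by omega) (Or.inr ⟨by omega, by
            simp [List.getD, List.getElem?_eq_getElem hqlen, hgq]⟩)]
          have htk1 : t.take (q.toNat + 1) = (t.take i ++ a) ++ ['"'] := by
            rw [List.take_add_one, List.getElem?_eq_getElem hqlen, hgq]
            congr 1
            rw [hadef, ← List.take_add]; congr 1; omega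
          rw [htk1]; simp

-- ===== VERDICT (by name: the statement is the Claim_ definition above) =====
theorem extract_label_value_spec : Claim_equal_extract_label_value := by
  intro s _
  show extract_label_value s = extract_label_value_alt s
  simp only [extract_label_value, extract_label_value_alt]
  by_cases h : PySem.Str.find s "label=\"" < 0
  · rw [if_pos h, if_pos h]
  · rw [if_neg h, if_neg h]
    rw [PySem.List.slice_from s.toList (show (0 : Int) ≤ PySem.Str.find s "label=\"" + 7 by omega)]
    generalize List.drop (PySem.Str.find s "label=\"" + 7).toNat s.toList = t
    rw [pvMain t (t.length + 1) 0 (by omega) (by omega) (Or.inl rfl)]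
    simp
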